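-- pv_equiv track=rewrite | github.com/MiniMinnoww/HackSheffield9 | backend/new_logic.py | get_all_notes_in_sections
-- ===== SOURCE A (Python) =====
-- def get_all_notes_in_sections(payload: dict, offset=0) -> dict:
--     """
--     Extracts all notes from a payload and groups them into sections based on the chords.
--
--     Args:
--         payload (dict): The input data containing chord and note information.
--         offset (int): The offset used to calculate MIDI notes.
--
--     Returns:
--         dict: A dictionary where keys are section indices and values are dictionaries
--               of MIDI notes and their frequencies.
--     """
--     notes = {}
--
--     # Replace initial '0' with '1' in the chords
--     if payload["chords"][0] == "0":
--         payload["chords"] = payload["chords"].replace("0", "1", 1)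
--
--     # Create sections based on '1's in the chord string
--     for index, character in enumerate(payload["chords"]):
--         if character == "1":
--             notes[index] = {}
--
--     section_indexes = list(notes.keys())
--
--     # Process notes in each section
--     for note, note_string in payload.items():
--         if note.isdigit():
--             for start, end in zip(section_indexes, section_indexes[1:] + [None]):
--                 split_note_string = note_string[start:end]
--                 midi_note = (int(note) - offset) % 12
--                 notes_in_line = split_note_string.count("1")
--                 notes[start][midi_note] = notes[start].get(midi_note, 0) + notes_in_line
--
--     return notes
-- ===== SOURCE B (Python) =====
-- def get_all_notes_in_sections(payload: dict, offset=0) -> dict: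
--     # Prefix-count re-implementation: one cumulative pass per note string,
--     # each section's count is a difference of two prefix counts (no per-section
--     # slicing/counting). Performs the same in-place chords mutation as the original.
--     chords = payload["chords"]
--     if chords[0] == "0":
--         chords = "1" + chords[1:]
--         payload["chords"] = chords
--
--     starts = [i for i, c in enumerate(chords) if c == "1"]
--     notes = {s: {} for s in starts}
--
--     for key, note_string in payload.items():
--         if key.isdigit():
--             midi = (int(key) - offset) % 12
--             # prefix counts: pref[i] = number of '1's in note_string[:i]
--             pref = [0]
--             acc = 0
--             for ch in note_string:
--                 if ch == "1":
--                     acc += 1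
--                 pref.append(acc)
--             n = len(note_string)
--             for k, s in enumerate(starts):
--                 e = starts[k + 1] if k + 1 < len(starts) else n
--                 cnt = pref[min(e, n)] - pref[min(s, n)]
--                 notes[s][midi] = notes[s].get(midi, 0) + cnt
--     return notes
-- ===== Notes on version B (the rewrite author's own statement) =====
-- stated objective: alternative
-- what changed: Replaces the zip-over-section-boundaries loop that slices and counts each section of every note string with a single cumulative prefix-count pass per note string, from which each section's count is obtained as a difference of two prefix counts.
import Mathlib
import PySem

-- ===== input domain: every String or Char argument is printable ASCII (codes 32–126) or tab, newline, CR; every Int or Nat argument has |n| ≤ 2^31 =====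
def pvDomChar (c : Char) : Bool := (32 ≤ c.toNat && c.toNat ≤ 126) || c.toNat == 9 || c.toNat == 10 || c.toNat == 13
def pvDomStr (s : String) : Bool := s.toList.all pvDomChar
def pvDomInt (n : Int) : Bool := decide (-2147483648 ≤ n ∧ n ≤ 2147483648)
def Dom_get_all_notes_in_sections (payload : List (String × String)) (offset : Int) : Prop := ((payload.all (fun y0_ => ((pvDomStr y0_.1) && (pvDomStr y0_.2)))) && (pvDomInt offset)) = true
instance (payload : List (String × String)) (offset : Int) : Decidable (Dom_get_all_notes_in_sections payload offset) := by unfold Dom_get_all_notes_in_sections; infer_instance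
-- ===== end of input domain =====

-- B replaces A's per-section slice-and-count with one cumulative prefix-count pass whose
-- differences give the section counts (objective: alternative; both mutate payload["chords"]
-- the same way — the theorems below are about the return value).

-- ===== PORT A =====
-- exact port of s.replace(old, new, 1) for non-empty old (here old = "0"): scan left to
-- right, splice new over the first occurrence of old
def pyReplaceOnce (s old new : List Char) : List Char :=
  match s with
  | [] => if old.isEmpty then new else []
  | c :: t => if old.isPrefixOf (c :: t) then new ++ (c :: t).drop old.length
              else c :: pyReplaceOnce t old new

def get_all_notes_in_sections (payload : List (String × String)) (offset : Int) : List (Int × List (Int × Int)) :=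
  -- the payload dict (type convention: association list ↦ Python dict)
  let payload0 := PySem.Dict.ofList payload
  -- payload["chords"] raises KeyError / IndexError when absent or empty: Pre_ excludes those
  let payload1 :=
    if PySem.Str.pyGet? (payload0.getD "chords" "") 0 = some '0' then
      payload0.insert "chords"
        (String.ofList (pyReplaceOnce (payload0.getD "chords" "").toList ['0'] ['1']))
    else payload0
  let notes0 : PySem.Dict Int (PySem.Dict Int Int) :=
    (PySem.List.enumerate (payload1.getD "chords" "").toList 0).foldl
      (fun n p => if p.2 = '1' then n.insert p.1 PySem.Dict.empty else n) PySem.Dict.empty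
  let section_indexes := notes0.keys
  let notes :=
    payload1.items.foldl (fun notes kv =>
      if PySem.Str.strIsdigit kv.1 then
        (section_indexes.zip
            ((PySem.List.slice section_indexes (some 1) none).map some ++ [none])).foldl
          (fun notes se =>
            let split_note_string := PySem.List.slice kv.2.toList (some se.1) se.2
            let midi := PySem.Int.mod ((PySem.Int.ofStr? kv.1).getD 0 - offset) 12
            -- split_note_string.count("1"): one-char needle, so its occurrence count is the char count
            let notes_in_line : Int := (split_note_string.count '1' : Int)
            -- notes[start][midi] = notes[start].get(midi, 0) + notes_in_line (start is always a key)
            notes.modify se.1 PySem.Dict.empty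
              (fun inner => inner.insert midi (inner.getD midi 0 + notes_in_line)))
          notes
      else notes) notes0
  notes.items.map (fun p => (p.1, p.2.items))

-- ===== PORT B =====
def get_all_notes_in_sections_alt (payload : List (String × String)) (offset : Int) : List (Int × List (Int × Int)) :=
  let payload0 := PySem.Dict.ofList payload
  let chords0 := payload0.getD "chords" ""
  let cp :=
    if PySem.Str.pyGet? chords0 0 = some '0' then
      let c := ['1'] ++ PySem.List.slice chords0.toList (some 1) none
      (c, payload0.insert "chords" (String.ofList c))
    else (chords0.toList, payload0)
  let chords := cp.1
  let payload1 := cp.2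
  let starts : List Int :=
    (PySem.List.enumerate chords 0).foldl
      (fun acc p => if p.2 = '1' then acc ++ [p.1] else acc) []
  let notes0 : PySem.Dict Int (PySem.Dict Int Int) :=
    starts.foldl (fun n s => n.insert s PySem.Dict.empty) PySem.Dict.empty
  let notes :=
    payload1.items.foldl (fun notes kv =>
      if PySem.Str.strIsdigit kv.1 then
        let midi := PySem.Int.mod ((PySem.Int.ofStr? kv.1).getD 0 - offset) 12
        -- pref[i] = number of '1's in note_string[:i], one cumulative pass
        let pref :=
          (kv.2.toList.foldl
            (fun st ch => let a := if ch = '1' then st.1 + 1 else st.1; (a, st.2 ++ [a]))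
            ((0 : Int), ([0] : List Int))).2
        let n : Int := PySem.List.len kv.2.toList
        (PySem.List.enumerate starts 0).foldl
          (fun notes ks =>
            let e := if ks.1 + 1 < PySem.List.len starts then PySem.List.pyGetD starts (ks.1 + 1) 0 else n
            let cnt := PySem.List.pyGetD pref (min e n) 0 - PySem.List.pyGetD pref (min ks.2 n) 0
            notes.modify ks.2 PySem.Dict.empty
              (fun inner => inner.insert midi (inner.getD midi 0 + cnt)))
          notes
      else notes) notes0
  notes.items.map (fun p => (p.1, p.2.items))

-- ===== PRECONDITION & SPEC =====
-- Pre_ excludes exactly the inputs where Python raises: a payload without a "chords" key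
-- (KeyError) or with an empty chords string (payload["chords"][0] is an IndexError)
def Pre_get_all_notes_in_sections (payload : List (String × String)) (offset : Int) : Prop :=
  (PySem.Dict.ofList payload).getD "chords" "" ≠ ""
instance (payload : List (String × String)) (offset : Int) : Decidable (Pre_get_all_notes_in_sections payload offset) := by unfold Pre_get_all_notes_in_sections; infer_instance

def pvWitness_get_all_notes_in_sections : (List (String × String)) × Int :=
  ([("chords", "101"), ("60", "1101")], 2)

def Spec_get_all_notes_in_sections (payload : List (String × String)) (offset : Int) (out : List (Int × List (Int × Int))) : Prop := out = get_all_notes_in_sections_alt payload offset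
instance (payload : List (String × String)) (offset : Int) (out : List (Int × List (Int × Int))) : Decidable (Spec_get_all_notes_in_sections payload offset out) := by unfold Spec_get_all_notes_in_sections; infer_instance

-- ===== CLAIM (what is proved, stated in full; the proofs are below) =====
def Claim_equal_get_all_notes_in_sections : Prop := ∀ (payload : List (String × String)) (offset : Int), Dom_get_all_notes_in_sections payload offset → Pre_get_all_notes_in_sections payload offset → Spec_get_all_notes_in_sections payload offset (get_all_notes_in_sections payload offset)

-- ===== LEMMAS AND PROOFS =====

theorem pv_witness_ok :
    Dom_get_all_notes_in_sections pvWitness_get_all_notes_in_sections.1 pvWitness_get_all_notes_in_sections.2 ∧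
    Pre_get_all_notes_in_sections pvWitness_get_all_notes_in_sections.1 pvWitness_get_all_notes_in_sections.2 := by
  decide

theorem replaceOnce_head (c d : Char) (t : List Char) :
    pyReplaceOnce (c :: t) [c] [d] = d :: t := by
  simp [pyReplaceOnce, List.isPrefixOf]

-- B's section starts: the '1'-positions of the (mutated) chord string, in order
def startsOf (chords : List Char) : List Int :=
  (PySem.List.enumerate chords 0).foldl (fun acc p => if p.2 = '1' then acc ++ [p.1] else acc) []

theorem startsOf_eq (chords : List Char) :
    startsOf chords
    = ((PySem.List.enumerate chords 0).filter (fun p => decide (p.2 = '1'))).map (·.1) := by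
  unfold startsOf
  rw [PySem.List.foldl_append_ite (fun (p : Int × Char) => p.2 = '1') (fun (p : Int × Char) => p.1)]
  simp

theorem startsOf_pairwise (chords : List Char) : (startsOf chords).Pairwise (· < ·) := by
  rw [startsOf_eq]
  refine List.Pairwise.map _ (fun a b h => h) ?_
  exact (PySem.List.pairwise_lt_enumerate chords 0).filter _

theorem startsOf_mem (chords : List Char) (x : Int) (hx : x ∈ startsOf chords) :
    ∃ m : Nat, x = (m : Int) ∧ m < chords.length := by
  rw [startsOf_eq] at hx
  obtain ⟨p, hp, rfl⟩ := List.mem_map.mp hx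
  have := List.mem_filter.mp hp |>.1
  obtain ⟨k, hk, rfl⟩ := (PySem.List.mem_enumerate_iff _ _ _).mp this
  exact ⟨k, by simp, hk⟩

-- A's zip over (section_indexes, section_indexes[1:] + [None]) is an indexed traversal of the starts
theorem zip_sections (starts : List Int) :
    starts.zip ((PySem.List.slice starts (some 1) none).map some ++ [none])
    = (PySem.List.enumerate starts 0).map (fun p => (p.2, starts[p.1.toNat + 1]?)) := by
  rw [PySem.List.slice_from_one]
  cases starts with
  | nil => simp
  | cons s t =>
    apply List.ext_getElem
    · simp [PySem.List.length_enumerate]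
    · intro i h1 h2
      simp only [List.getElem_zip, List.getElem_map, PySem.List.getElem_enumerate]
      refine Prod.ext ?_ ?_
      · simp
      · show (t.map some ++ [none])[i]'(by simp at h1 ⊢; omega) = (s :: t)[((0:Int) + i).toNat + 1]?
        have hi : i < t.length + 1 := by simp at h1; omega
        have hnn : ((0:Int) + i).toNat = i := by omega
        rw [hnn]
        rcases Nat.lt_or_ge i t.length with h | h
        · rw [List.getElem_append_left (by simp [h])]
          simp [h]
        · have : i = t.length := by omega
          subst this
          rw [List.getElem_append_right (by simp)]
          simp

-- B's cumulative pass: final accumulator and the whole prefix-count table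
theorem pref_spec (l : List Char) (a : Int) (p : List Int) :
    l.foldl (fun st ch => let x := if ch = '1' then st.1 + 1 else st.1; (x, st.2 ++ [x])) (a, p)
    = (a + (l.count '1' : Int),
       p ++ (List.range l.length).map (fun j => a + ((l.take (j+1)).count '1' : Int))) := by
  induction l generalizing a p with
  | nil => simp
  | cons c t ih =>
    simp only [List.foldl_cons]
    rw [ih]
    refine Prod.ext ?_ ?_
    · show _ = a + (((c :: t).count '1' : Nat) : Int)
      simp only [List.count_cons, beq_iff_eq]
      split_ifs with h <;> push_cast <;> ring
    · show _ = p ++ (List.range (t.length + 1)).map _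
      rw [List.range_succ_eq_map, List.map_cons, List.map_map]
      simp only [List.append_assoc, List.singleton_append]
      congr 1
      refine List.cons_eq_cons.mpr ⟨?_, ?_⟩
      · simp only [List.take_succ_cons, List.take_zero, List.count_cons, List.count_nil, beq_iff_eq]
        split_ifs with h <;> simp
      · congr 1
        funext j
        simp only [Function.comp, List.take_succ_cons, List.count_cons, beq_iff_eq]
        split_ifs with h <;> push_cast <;> ring

theorem prefAt (l : List Char) (j : Nat) (hj : j ≤ l.length) :
    ((0:Int) :: (List.range l.length).map (fun i => (0:Int) + ((l.take (i+1)).count '1' : Int))).getD j 0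
    = ((l.take j).count '1' : Int) := by
  cases j with
  | zero => simp
  | succ m =>
    have hm : m < l.length := by omega
    simp [List.getD, hm]

theorem cnt_slice_mid (ns : List Char) (sm em : Nat) (h : sm ≤ em) :
    (((PySem.List.slice ns (some (sm:Int)) (some (em:Int))).count '1' : Nat) : Int)
    = ((ns.take em).count '1' : Int) - ((ns.take sm).count '1' : Int) := by
  rw [PySem.List.slice_natCast]
  have he : ns.take em = ns.take sm ++ (ns.drop sm).take (em - sm) := by
    conv_lhs => rw [show em = sm + (em - sm) by omega]
    rw [List.take_add]
  rw [he, List.count_append]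
  push_cast; ring

theorem cnt_slice_last (ns : List Char) (sm : Nat) :
    (((PySem.List.slice ns (some (sm:Int)) none).count '1' : Nat) : Int)
    = (ns.count '1' : Int) - ((ns.take sm).count '1' : Int) := by
  rw [PySem.List.slice_from_natCast]
  rcases Nat.lt_or_ge ns.length sm with h | h
  · rw [List.drop_of_length_le (Nat.le_of_lt h), List.take_of_length_le (Nat.le_of_lt h)]
    simp
  · conv_rhs => rw [← List.take_append_drop sm ns]
    rw [List.count_append, List.take_left' (by simp [Nat.min_eq_left h])]
    push_cast; ring

theorem take_clamp (ns : List Char) (j : Nat) :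
    ns.take (min j ns.length) = ns.take j := by
  rcases Nat.lt_or_ge ns.length j with h | h
  · rw [Nat.min_eq_right (Nat.le_of_lt h), List.take_of_length_le (le_refl _),
      List.take_of_length_le (Nat.le_of_lt h)]
  · simp [Nat.min_eq_left h]

-- per-(note,string) step: A's slice-and-count section loop equals B's prefix-difference loop
theorem step_eq (chords : List Char) (offset : Int)
    (d : PySem.Dict Int (PySem.Dict Int Int)) (kv : String × String) :
    (if PySem.Str.strIsdigit kv.1 then
      ((startsOf chords).zip
          ((PySem.List.slice (startsOf chords) (some 1) none).map some ++ [none])).foldl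
        (fun notes se =>
          let split_note_string := PySem.List.slice kv.2.toList (some se.1) se.2
          let midi := PySem.Int.mod ((PySem.Int.ofStr? kv.1).getD 0 - offset) 12
          let notes_in_line : Int := (split_note_string.count '1' : Int)
          notes.modify se.1 PySem.Dict.empty
            (fun inner => inner.insert midi (inner.getD midi 0 + notes_in_line))) d
    else d)
    =
    (if PySem.Str.strIsdigit kv.1 then
      let midi := PySem.Int.mod ((PySem.Int.ofStr? kv.1).getD 0 - offset) 12
      let pref :=
        (kv.2.toList.foldl
          (fun st ch => let a := if ch = '1' then st.1 + 1 else st.1; (a, st.2 ++ [a]))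
          ((0 : Int), ([0] : List Int))).2
      let n : Int := PySem.List.len kv.2.toList
      (PySem.List.enumerate (startsOf chords) 0).foldl
        (fun notes ks =>
          let e := if ks.1 + 1 < PySem.List.len (startsOf chords) then PySem.List.pyGetD (startsOf chords) (ks.1 + 1) 0 else n
          let cnt := PySem.List.pyGetD pref (min e n) 0 - PySem.List.pyGetD pref (min ks.2 n) 0
          notes.modify ks.2 PySem.Dict.empty
            (fun inner => inner.insert midi (inner.getD midi 0 + cnt))) d
    else d) := by
  by_cases hd : PySem.Str.strIsdigit kv.1
  · simp only [if_pos hd]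
    rw [zip_sections, List.foldl_map]
    set starts := startsOf chords with hstarts
    set ns := kv.2.toList with hns
    apply PySem.List.foldl_congr_mem
    intro acc p hp
    obtain ⟨k, hk, rfl⟩ := (PySem.List.mem_enumerate_iff _ _ _).mp hp
    simp only []
    congr 1
    have hmemk : starts[k] ∈ starts := List.getElem_mem hk
    obtain ⟨sm, hsm, hsmlt⟩ := startsOf_mem chords _ hmemk
    have htoNat : ((0:Int) + (k:Int)).toNat = k := by omega
    rw [htoNat]
    rw [pref_spec]
    simp only [PySem.List.len_eq]
    by_cases hk1 : k + 1 < starts.length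
    · -- middle section
      have hcond : ((0:Int) + (k:Int)) + 1 < (starts.length : Int) := by omega
      rw [if_pos hcond]
      have hmemk1 : starts[k+1] ∈ starts := List.getElem_mem hk1
      obtain ⟨em, hem, hemlt⟩ := startsOf_mem chords _ hmemk1
      have hlt : starts[k] < starts[k+1] :=
        (List.pairwise_iff_getElem.mp (startsOf_pairwise chords)) k (k+1) hk hk1 (by omega)
      have hsmem : sm < em := by rw [hsm, hem] at hlt; exact_mod_cast hlt
      have hsome : starts[k+1]? = some starts[k+1] := List.getElem?_eq_getElem hk1
      have hgetD : PySem.List.pyGetD starts ((0:Int) + (k:Int) + 1) 0 = starts[k+1] := by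
        have : ((0:Int) + (k:Int) + 1) = ((k+1 : Nat) : Int) := by push_cast; ring
        rw [this, PySem.List.pyGetD_natCast, List.getD_eq_getElem _ _ hk1]
      have hcnt :
          ((List.count '1' (PySem.List.slice ns (some starts[k]) starts[k+1]?) : Nat) : Int)
          = PySem.List.pyGetD
              (([0] : List Int) ++ List.map (fun j => 0 + ((List.count '1' (List.take (j + 1) ns) : Nat) : Int)) (List.range ns.length))
              (min (PySem.List.pyGetD starts ((0:Int) + (k:Int) + 1) 0) (ns.length : Int)) 0 -
            PySem.List.pyGetD
              (([0] : List Int) ++ List.map (fun j => 0 + ((List.count '1' (List.take (j + 1) ns) : Nat) : Int)) (List.range ns.length))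
              (min starts[k] (ns.length : Int)) 0 := by
        rw [hgetD, hsome, hsm, hem]
        have hmin1 : min ((em:Int)) ((ns.length : Int)) = ((min em ns.length : Nat) : Int) := by
          simp [Nat.cast_min]
        have hmin2 : min ((sm:Int)) ((ns.length : Int)) = ((min sm ns.length : Nat) : Int) := by
          simp [Nat.cast_min]
        rw [hmin1, hmin2, List.singleton_append, PySem.List.pyGetD_natCast, PySem.List.pyGetD_natCast,
          prefAt ns _ (Nat.min_le_right _ _), prefAt ns _ (Nat.min_le_right _ _),
          take_clamp, take_clamp, cnt_slice_mid ns sm em (Nat.le_of_lt hsmem)]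
      simp only [hcnt]
    · -- last section
      have hcond : ¬ (((0:Int) + (k:Int)) + 1 < (starts.length : Int)) := by omega
      rw [if_neg hcond]
      have hnone : starts[k+1]? = none := List.getElem?_eq_none (by omega)
      have hcnt :
          ((List.count '1' (PySem.List.slice ns (some starts[k]) starts[k+1]?) : Nat) : Int)
          = PySem.List.pyGetD
              (([0] : List Int) ++ List.map (fun j => 0 + ((List.count '1' (List.take (j + 1) ns) : Nat) : Int)) (List.range ns.length))
              (min ((ns.length:Int)) ((ns.length : Int))) 0 -
            PySem.List.pyGetD
              (([0] : List Int) ++ List.map (fun j => 0 + ((List.count '1' (List.take (j + 1) ns) : Nat) : Int)) (List.range ns.length))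
              (min starts[k] ((ns.length : Int))) 0 := by
        rw [hnone, hsm]
        have hmin2 : min ((sm:Int)) ((ns.length : Int)) = ((min sm ns.length : Nat) : Int) := by
          simp [Nat.cast_min]
        rw [min_self, hmin2, List.singleton_append, PySem.List.pyGetD_natCast, PySem.List.pyGetD_natCast,
          prefAt ns _ (Nat.min_le_right _ _), prefAt ns ns.length (le_refl _),
          take_clamp, List.take_length, cnt_slice_last ns sm]
      simp only [hcnt]
  · simp only [if_neg hd]

theorem notes0_eq (c : List Char) :
    (PySem.List.enumerate c 0).foldl
      (fun n p => if p.2 = '1' then n.insert p.1 PySem.Dict.empty else n)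
      (PySem.Dict.empty : PySem.Dict Int (PySem.Dict Int Int))
    = (startsOf c).foldl (fun n s => n.insert s PySem.Dict.empty) PySem.Dict.empty := by
  rw [startsOf_eq, List.foldl_map]
  exact PySem.List.foldl_ite_eq_foldl_filter (fun (p : Int × Char) => p.2 = '1')
    (fun (n : PySem.Dict Int (PySem.Dict Int Int)) (p : Int × Char) => n.insert p.1 PySem.Dict.empty) _ _

theorem keys_notes0 (c : List Char) :
    ((startsOf c).foldl (fun n s => n.insert s PySem.Dict.empty)
      (PySem.Dict.empty : PySem.Dict Int (PySem.Dict Int Int))).keys = startsOf c := by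
  rw [PySem.Dict.keys_foldl_insert (startsOf c) (fun _ _ => PySem.Dict.empty) _,
    PySem.Dict.keys_empty, PySem.Set.update_nil_left, PySem.Set.ofList_eq_self_of_nodup]
  exact (startsOf_pairwise c).imp (fun h => ne_of_lt h)

-- everything after the chords mutation, for a common mutated payload q and chord list c
theorem tails_eq (q : PySem.Dict String String) (c : List Char) (offset : Int) :
    ((q.items.foldl (fun notes kv =>
      if PySem.Str.strIsdigit kv.1 then
        (((PySem.List.enumerate c 0).foldl
            (fun n p => if p.2 = '1' then n.insert p.1 PySem.Dict.empty else n)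
            (PySem.Dict.empty : PySem.Dict Int (PySem.Dict Int Int))).keys.zip
            ((PySem.List.slice ((PySem.List.enumerate c 0).foldl
              (fun n p => if p.2 = '1' then n.insert p.1 PySem.Dict.empty else n)
              (PySem.Dict.empty : PySem.Dict Int (PySem.Dict Int Int))).keys (some 1) none).map some ++ [none])).foldl
          (fun notes se =>
            let split_note_string := PySem.List.slice kv.2.toList (some se.1) se.2
            let midi := PySem.Int.mod ((PySem.Int.ofStr? kv.1).getD 0 - offset) 12
            let notes_in_line : Int := (split_note_string.count '1' : Int)
            notes.modify se.1 PySem.Dict.empty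
              (fun inner => inner.insert midi (inner.getD midi 0 + notes_in_line)))
          notes
      else notes)
      ((PySem.List.enumerate c 0).foldl
        (fun n p => if p.2 = '1' then n.insert p.1 PySem.Dict.empty else n)
        PySem.Dict.empty)).items.map (fun p => (p.1, p.2.items)))
    =
    ((q.items.foldl (fun notes kv =>
      if PySem.Str.strIsdigit kv.1 then
        let midi := PySem.Int.mod ((PySem.Int.ofStr? kv.1).getD 0 - offset) 12
        let pref :=
          (kv.2.toList.foldl
            (fun st ch => let a := if ch = '1' then st.1 + 1 else st.1; (a, st.2 ++ [a]))
            ((0 : Int), ([0] : List Int))).2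
        let n : Int := PySem.List.len kv.2.toList
        (PySem.List.enumerate (startsOf c) 0).foldl
          (fun notes ks =>
            let e := if ks.1 + 1 < PySem.List.len (startsOf c) then PySem.List.pyGetD (startsOf c) (ks.1 + 1) 0 else n
            let cnt := PySem.List.pyGetD pref (min e n) 0 - PySem.List.pyGetD pref (min ks.2 n) 0
            notes.modify ks.2 PySem.Dict.empty
              (fun inner => inner.insert midi (inner.getD midi 0 + cnt)))
          notes
      else notes)
      ((startsOf c).foldl (fun n s => n.insert s PySem.Dict.empty)
        PySem.Dict.empty)).items.map (fun p => (p.1, p.2.items))) := by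
  rw [notes0_eq, keys_notes0]
  congr 1
  congr 1
  apply PySem.List.foldl_congr_mem
  intro acc kv _
  exact step_eq c offset acc kv

-- ===== VERDICT (by name: the statement is the Claim_ definition above) =====
theorem get_all_notes_in_sections_spec : Claim_equal_get_all_notes_in_sections := by
  intro payload offset _ _
  unfold Spec_get_all_notes_in_sections
  unfold get_all_notes_in_sections get_all_notes_in_sections_alt
  simp only []
  by_cases h : PySem.Str.pyGet? ((PySem.Dict.ofList payload).getD "chords" "") 0 = some '0'
  · simp only [if_pos h]
    have h' : ((PySem.Dict.ofList payload).getD "chords" "").toList[0]? = some '0' := by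
      simpa [pysem] using h
    obtain ⟨t, ht⟩ : ∃ t, ((PySem.Dict.ofList payload).getD "chords" "").toList = '0' :: t := by
      cases hc : ((PySem.Dict.ofList payload).getD "chords" "").toList with
      | nil => rw [hc] at h'; simp at h'
      | cons a t =>
        rw [hc] at h'; simp at h'
        exact ⟨t, by rw [h']⟩
    have h1 : String.ofList (pyReplaceOnce ((PySem.Dict.ofList payload).getD "chords" "").toList ['0'] ['1'])
        = String.ofList ('1' :: t) := by
      rw [ht, replaceOnce_head]
    have h2 : ['1'] ++ PySem.List.slice ((PySem.Dict.ofList payload).getD "chords" "").toList (some 1) none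
        = '1' :: t := by
      rw [ht, PySem.List.slice_from_one]; simp
    rw [h1, h2]
    simp only [PySem.Dict.getD_insert_self, String.toList_ofList]
    exact tails_eq _ ('1' :: t) offset
  · simp only [if_neg h]
    exact tails_eq _ _ offset
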